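-- pv_equiv track=rewrite | github.com/iamveene/Tsushin | backend/agent/interactive_selection.py | _rank_options
-- ===== SOURCE A (Python) =====
-- from typing import List, Optional
--
-- def _rank_options(options: List[str], keywords: List[str]) -> List[str]:
--     scored = []
--     for option in options:
--         option_lower = option.lower()
--         score = sum(1 for keyword in keywords if keyword in option_lower)
--         scored.append((score, option))
--     scored.sort(key=lambda item: item[0], reverse=True)
--     return [option for score, option in scored if score > 0]
-- ===== SOURCE B (Python) =====
-- from typing import List
--
--
-- def _rank_options(options: List[str], keywords: List[str]) -> List[str]:
--     # Counting/bucket sort by score: buckets[s] collects options with score s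
--     # in input order; emitting buckets from high score down to 1 reproduces the
--     # stable reverse sort and drops score-0 options.
--     buckets = [[] for _ in range(len(keywords) + 1)]
--     for option in options:
--         option_lower = option.lower()
--         score = sum(1 for keyword in keywords if keyword in option_lower)
--         buckets[score].append(option)
--     result = []
--     for score in range(len(keywords), 0, -1):
--         result.extend(buckets[score])
--     return result
-- ===== Notes on version B (the rewrite author's own statement) =====
-- stated objective: alternative
-- what changed: Replaced the stable comparison sort plus post-filter with a counting/bucket sort: each option is appended to buckets[score] in input order and buckets are emitted from highest score down to 1, dropping score 0.
import Mathlib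
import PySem

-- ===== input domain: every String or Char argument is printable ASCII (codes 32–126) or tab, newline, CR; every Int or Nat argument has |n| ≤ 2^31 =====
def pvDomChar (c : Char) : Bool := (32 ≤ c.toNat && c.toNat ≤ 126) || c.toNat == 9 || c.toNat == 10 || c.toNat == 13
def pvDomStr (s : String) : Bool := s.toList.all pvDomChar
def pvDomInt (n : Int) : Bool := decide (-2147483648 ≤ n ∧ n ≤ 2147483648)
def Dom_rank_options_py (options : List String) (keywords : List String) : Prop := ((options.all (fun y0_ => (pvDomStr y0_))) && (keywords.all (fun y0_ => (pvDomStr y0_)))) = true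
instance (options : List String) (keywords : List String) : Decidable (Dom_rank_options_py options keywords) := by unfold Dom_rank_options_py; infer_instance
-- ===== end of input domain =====

-- B replaces A's stable reverse sort + filter with a counting/bucket sort over scores (alternative algorithm, same results).


-- ===== PORT A =====
def rank_options_py (options : List String) (keywords : List String) : List String :=
  let scored : List (Int × String) := options.foldl (fun acc option =>
    let option_lower := PySem.Str.lower option
    let score : Int := ((keywords.filter (fun keyword => PySem.Str.isIn keyword option_lower)).map
      (fun _ => (1 : Int))).sum
    acc ++ [(score, option)]) []
  let scored := PySem.List.sorted scored (fun item => item.1) true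
  (scored.filter (fun p => decide (p.1 > 0))).map (fun p => p.2)

-- ===== PORT B =====
-- buckets[score].append(option)
def pvBucketAppend (bs : List (List String)) (i : Int) (v : String) : List (List String) :=
  bs.set i.toNat (PySem.List.pyGetD bs i [] ++ [v])

def rank_options_py_alt (options : List String) (keywords : List String) : List String :=
  let buckets : List (List String) := options.foldl (fun bs option =>
    let option_lower := PySem.Str.lower option
    let score : Int := ((keywords.filter (fun keyword => PySem.Str.isIn keyword option_lower)).map
      (fun _ => (1 : Int))).sum
    pvBucketAppend bs score option) (List.replicate (keywords.length + 1) [])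
  (PySem.List.pyRange (keywords.length : Int) 0 (-1)).foldl
    (fun result score => result ++ PySem.List.pyGetD buckets score []) []

-- ===== PRECONDITION & SPEC =====
def Spec_rank_options_py (options : List String) (keywords : List String) (out : List String) : Prop := out = rank_options_py_alt options keywords
instance (options : List String) (keywords : List String) (out : List String) : Decidable (Spec_rank_options_py options keywords out) := by unfold Spec_rank_options_py; infer_instance

-- ===== CLAIM (what is proved, stated in full; the proofs are below) =====
def Claim_equal_rank_options_py : Prop := ∀ (options : List String) (keywords : List String), Dom_rank_options_py options keywords → Spec_rank_options_py options keywords (rank_options_py options keywords)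

-- ===== LEMMAS AND PROOFS =====


-- helper: the score of one option (exactly the expression both ports inline)
def pvSc (keywords : List String) (o : String) : Int :=
  ((keywords.filter (fun keyword => PySem.Str.isIn keyword (PySem.Str.lower o))).map
    (fun _ => (1 : Int))).sum

-- descending concatenation of buckets k, k-1, …, 1
def pvDesc (f : Nat → List String) : Nat → List String
  | 0 => []
  | (k+1) => f (k+1) ++ pvDesc f k

-- descending concatenation of the score-class sublists k, k-1, …, 0
def pvCB {α : Type} (key : α → Int) (l : List α) : Nat → List α
  | 0 => l.filter (fun p => key p == (0 : Int))
  | (k+1) => l.filter (fun p => key p == ((k : Int) + 1)) ++ pvCB key l k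

theorem pvSc_nonneg (keywords : List String) (o : String) :
    0 ≤ pvSc keywords o ∧ pvSc keywords o ≤ (keywords.length : Int) := by
  have h := PySem.List.sum_map_const_int
    (keywords.filter (fun keyword => PySem.Str.isIn keyword (PySem.Str.lower o))) 1
  unfold pvSc
  rw [h]
  have hlen := List.length_filter_le (fun keyword => PySem.Str.isIn keyword (PySem.Str.lower o)) keywords
  simp only [mul_one]
  constructor
  · positivity
  · exact_mod_cast hlen

theorem pvInsertBy_cons {α : Type} (bf : α → α → Bool) (x y : α) (ys : List α) :
    PySem.List.insertBy bf x (y :: ys) =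
      if bf x y then x :: y :: ys else y :: PySem.List.insertBy bf x ys := rfl

theorem pvInsertBy_append_not {α : Type} (bf : α → α → Bool) (x : α) (l1 l2 : List α)
    (h : ∀ y ∈ l1, bf x y = false) :
    PySem.List.insertBy bf x (l1 ++ l2) = l1 ++ PySem.List.insertBy bf x l2 := by
  induction l1 with
  | nil => simp
  | cons y ys ih =>
    rw [List.cons_append, pvInsertBy_cons, h y (by simp), ih (fun z hz => h z (by simp [hz]))]
    simp

theorem pvInsertBy_all_before {α : Type} (bf : α → α → Bool) (x : α) (l : List α)
    (h : ∀ y ∈ l, bf x y = true) :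
    PySem.List.insertBy bf x l = x :: l := by
  cases l with
  | nil => rfl
  | cons y ys => rw [pvInsertBy_cons, h y (by simp)]; simp

theorem pvCB_nil {α : Type} (key : α → Int) (k : Nat) : pvCB key [] k = [] := by
  induction k with
  | zero => simp [pvCB]
  | succ k ih => simp [pvCB, ih]

theorem pvCB_key_le {α : Type} (key : α → Int) (l : List α) (k : Nat) :
    ∀ p ∈ pvCB key l k, key p ≤ (k : Int) := by
  induction k with
  | zero =>
    intro p hp
    have := (List.mem_filter.mp hp).2
    simp only [beq_iff_eq] at this
    omega
  | succ k ih =>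
    intro p hp
    rcases List.mem_append.mp hp with h | h
    · have := (List.mem_filter.mp h).2
      simp only [beq_iff_eq] at this
      push_cast
      omega
    · have := ih p h
      push_cast
      push_cast at this
      omega

theorem pvCB_append_single_high {α : Type} (key : α → Int) (ys : List α) (x : α) (k : Nat)
    (h : (k : Int) < key x) :
    pvCB key (ys ++ [x]) k = pvCB key ys k := by
  induction k with
  | zero =>
    simp only [pvCB, List.filter_append]
    have : key x ≠ 0 := by omega
    simp [this]
  | succ k ih =>
    simp only [pvCB, List.filter_append]
    have hx : key x ≠ (k : Int) + 1 := by push_cast at h; omega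
    rw [ih (by push_cast at h ⊢; omega)]
    simp [hx]

theorem pvInsertBy_pvCB {α : Type} (key : α → Int) (x : α) (ys : List α) (k : Nat)
    (h0 : 0 ≤ key x) (hk : key x ≤ (k : Int)) :
    PySem.List.insertBy (fun a b => decide (key b < key a)) x (pvCB key ys k) =
      pvCB key (ys ++ [x]) k := by
  induction k with
  | zero =>
    have hx : key x = 0 := by omega
    rw [pvCB, PySem.List.insertBy_of_forall_not_before _ _ _ (by
      intro y hy
      have := (List.mem_filter.mp hy).2
      simp only [beq_iff_eq] at this
      simp [this, hx])]
    simp [pvCB, List.filter_append, hx]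
  | succ k ih =>
    by_cases hx : key x = (k : Int) + 1
    · rw [pvCB, pvInsertBy_append_not _ _ _ _ (by
        intro y hy
        have := (List.mem_filter.mp hy).2
        simp only [beq_iff_eq] at this
        simp [this, hx]),
        pvInsertBy_all_before _ _ _ (by
          intro y hy
          have := pvCB_key_le key ys k y hy
          simp only [decide_eq_true_eq]
          omega)]
      rw [pvCB, pvCB_append_single_high key ys x k (by omega), List.filter_append]
      simp [hx]
    · have hk' : key x ≤ (k : Int) := by push_cast at hk; omega
      rw [pvCB, pvInsertBy_append_not _ _ _ _ (by
        intro y hy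
        have := (List.mem_filter.mp hy).2
        simp only [beq_iff_eq] at this
        simp only [decide_eq_false_iff_not, not_lt, this]
        omega), ih hk']
      rw [pvCB, List.filter_append]
      have : (key x == (k : Int) + 1) = false := by simp [hx]
      simp [this]

theorem pvSorted_rev_eq_pvCB {α : Type} (key : α → Int) (l : List α) (k : Nat)
    (h : ∀ p ∈ l, 0 ≤ key p ∧ key p ≤ (k : Int)) :
    PySem.List.sorted l key true = pvCB key l k := by
  rw [PySem.List.sorted_rev_eq_foldl_insertBy]
  induction l using List.reverseRecOn with
  | nil => simp [pvCB_nil]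
  | append_singleton ys x ih =>
    rw [List.foldl_append, ih (fun p hp => h p (by simp [hp]))]
    have hx := h x (by simp)
    exact pvInsertBy_pvCB key x ys k hx.1 hx.2

-- B-side: the bucket-building fold
theorem pvBucketAppend_map_range (g : Nat → List String) (n : Nat) (i : Int) (v : String)
    (h0 : 0 ≤ i) (hn : i.toNat < n) :
    pvBucketAppend ((List.range n).map g) i v =
      (List.range n).map (fun s => if s = i.toNat then g s ++ [v] else g s) := by
  unfold pvBucketAppend
  have hi : i = (i.toNat : Int) := by omega
  rw [hi, PySem.List.pyGetD_natCast]
  have hget : ((List.range n).map g).getD i.toNat [] = g i.toNat := by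
    rw [List.getD_eq_getElem?_getD]
    simp [hn]
  rw [hget]
  apply List.ext_getElem
  · simp
  · intro j hj hj'
    simp only [List.getElem_set, List.getElem_map, List.getElem_range, Int.toNat_natCast]
    by_cases hji : j = i.toNat
    · simp [hji]
    · simp only [hji, if_false]
      rw [if_neg (fun h => hji h.symm)]

theorem pvFoldl_bucket (key : String → Int) (opts : List String) (n : Nat) (g : Nat → List String)
    (h : ∀ o ∈ opts, 0 ≤ key o ∧ key o < (n : Int)) :
    opts.foldl (fun bs o => pvBucketAppend bs (key o) o) ((List.range n).map g) =
      (List.range n).map (fun s => g s ++ opts.filter (fun o => key o == (s : Int))) := by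
  induction opts generalizing g with
  | nil => simp
  | cons o rest ih =>
    have ho := h o (by simp)
    have hlt : (key o).toNat < n := by omega
    rw [List.foldl_cons, pvBucketAppend_map_range g n (key o) o ho.1 hlt,
      ih _ (fun x hx => h x (by simp [hx]))]
    apply List.map_congr_left
    intro s hs
    by_cases hos : key o = (s : Int)
    · have : s = (key o).toNat := by omega
      simp [hos]
    · have h1 : ¬ s = (key o).toNat := by omega
      have h2 : (key o == (s : Int)) = false := by simp [hos]
      simp [h1, h2]

-- the descending pyRange loop is pvDesc
theorem pvPyRange_desc (hI : Int → List String) (k : Nat) :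
    (PySem.List.pyRange (k : Int) 0 (-1)).flatMap hI = pvDesc (fun s => hI (s : Int)) k := by
  induction k with
  | zero => rw [PySem.List.pyRange_neg_one_eq_nil (by omega)]; rfl
  | succ k ih =>
    rw [PySem.List.pyRange_neg_one_cons (by push_cast; omega), List.flatMap_cons]
    have h1 : ((k : Int) + 1) - 1 = (k : Int) := by omega
    push_cast
    rw [h1, ih]
    simp [pvDesc]

theorem pvDesc_congr (f g : Nat → List String) (k : Nat)
    (h : ∀ s, 1 ≤ s → s ≤ k → f s = g s) : pvDesc f k = pvDesc g k := by
  induction k with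
  | zero => rfl
  | succ k ih =>
    simp only [pvDesc]
    rw [h (k+1) (by omega) (by omega), ih (fun s h1 h2 => h s h1 (by omega))]

-- A-side: filtering + projecting the score classes
theorem pvCB_filter_map (keywords : List String) (opts : List String) (k : Nat) :
    ((pvCB (fun p => p.1) (opts.map (fun o => (pvSc keywords o, o))) k).filter
        (fun p => decide (p.1 > 0))).map (fun p => p.2) =
      pvDesc (fun s => opts.filter (fun o => pvSc keywords o == (s : Int))) k := by
  induction k with
  | zero =>
    simp only [pvCB, pvDesc]
    rw [List.filter_eq_nil_iff.mpr ?_]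
    · rfl
    · intro p hp
      have := (List.mem_filter.mp hp).2
      simp only [beq_iff_eq] at this
      simp [this]
  | succ k ih =>
    simp only [pvCB, pvDesc, List.filter_append, List.map_append]
    rw [ih]
    congr 1
    rw [List.filter_eq_self.mpr ?_]
    · rw [List.filter_map, List.map_map]
      simp only [Function.comp_def]
      simp
    · intro p hp
      have := (List.mem_filter.mp hp).2
      simp only [beq_iff_eq] at this
      have : (0 : Int) < p.1 := by rw [this]; positivity
      simpa using this

theorem pvRank_eq (options keywords : List String) :
    rank_options_py options keywords = rank_options_py_alt options keywords := by
  show (((PySem.List.sorted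
      (options.foldl (fun acc option => acc ++ [(pvSc keywords option, option)]) [])
      (fun item => item.1) true).filter (fun p => decide (p.1 > 0))).map (fun p => p.2)) =
    (PySem.List.pyRange (keywords.length : Int) 0 (-1)).foldl
      (fun result score => result ++ PySem.List.pyGetD
        (options.foldl (fun bs option => pvBucketAppend bs (pvSc keywords option) option)
          (List.replicate (keywords.length + 1) [])) score []) []
  rw [PySem.List.foldl_append_singleton_eq_map, List.nil_append,
    pvSorted_rev_eq_pvCB (fun p => p.1)
      (options.map (fun o => (pvSc keywords o, o))) keywords.length (by
        intro p hp
        rcases List.mem_map.mp hp with ⟨o, _, rfl⟩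
        exact pvSc_nonneg keywords o),
    pvCB_filter_map]
  rw [show (List.replicate (keywords.length + 1) ([] : List String)) =
      (List.range (keywords.length + 1)).map (fun _ => ([] : List String)) by
    rw [List.map_const']; simp]
  rw [pvFoldl_bucket (pvSc keywords) options (keywords.length + 1) _ (by
      intro o _
      have h := pvSc_nonneg keywords o
      refine ⟨h.1, ?_⟩
      push_cast
      omega)]
  rw [PySem.List.foldl_append_eq_flatMap, List.nil_append, pvPyRange_desc]
  apply pvDesc_congr
  intro s h1 h2
  rw [PySem.List.pyGetD_natCast, List.getD_eq_getElem?_getD]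
  simp [Nat.lt_succ_of_le h2]

-- ===== VERDICT (by name: the statement is the Claim_ definition above) =====
theorem rank_options_py_spec : Claim_equal_rank_options_py := by
  intro options keywords _
  unfold Spec_rank_options_py
  exact pvRank_eq options keywords
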